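-- pv_equiv track=rewrite | github.com/youssef47048/Sustainability-Compass | Sustainability Compass/sdg_chart_generator.py | _get_top_sdgs
-- ===== SOURCE A (Python) =====
-- from typing import Dict, List, Tuple
--
-- def _get_top_sdgs(sdg_data: Dict, limit: int = 9) -> Dict[str, str]:
--     """Get top SDGs by score if no explicit contribution levels"""
--     sdg_scores = []
--
--     for sdg_key, data in sdg_data.items():
--         if sdg_key.startswith('sdg_') and isinstance(data, dict):
--             score = data.get('score', 0)
--             if score > 0:
--                 sdg_scores.append((sdg_key, score))
--
--     # Sort by score and take top ones
--     sdg_scores.sort(key=lambda x: x[1], reverse=True)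
--     top_sdgs = sdg_scores[:limit]
--
--     # Assign contribution levels based on score
--     result = {}
--     for sdg_key, score in top_sdgs:
--         if score >= 7:
--             result[sdg_key] = 'High'
--         elif score >= 4:
--             result[sdg_key] = 'Medium'
--         else:
--             result[sdg_key] = 'Low'
--
--     return result
-- ===== SOURCE B (Python) =====
-- import heapq
--
--
-- def _get_top_sdgs(sdg_data, limit=9):
--     """Get top SDGs by score if no explicit contribution levels"""
--     candidates = [(k, s) for k, v in sdg_data.items()
--                   if k.startswith('sdg_') and isinstance(v, dict)
--                   and (s := v.get('score', 0)) > 0]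
--     top = heapq.nlargest(limit, candidates, key=lambda kv: kv[1])
--     return {k: ('High' if s >= 7 else 'Medium' if s >= 4 else 'Low')
--             for k, s in top}
-- ===== Notes on version B (the rewrite author's own statement) =====
-- stated objective: alternative
-- what changed: Filtering becomes a single comprehension, the full sort + slice is replaced by a heapq.nlargest partial heap selection of the top-limit entries, and the result is built with a dict comprehension instead of an imperative if/elif loop.
-- intended difference: For negative limit with more than |limit| positive-scoring sdg_ entries, A's slice sdg_scores[:limit] keeps all but the lowest |limit| entries while B returns the empty dict; heapq.nlargest's empty result is the intended meaning of a non-positive top-N request. — e.g. on _get_top_sdgs([("sdg_a", [("score", 5)]), ("sdg_b", [("score", 3)])], -1): A returns [("sdg_a", "Medium")], B returns []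
import Mathlib
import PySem

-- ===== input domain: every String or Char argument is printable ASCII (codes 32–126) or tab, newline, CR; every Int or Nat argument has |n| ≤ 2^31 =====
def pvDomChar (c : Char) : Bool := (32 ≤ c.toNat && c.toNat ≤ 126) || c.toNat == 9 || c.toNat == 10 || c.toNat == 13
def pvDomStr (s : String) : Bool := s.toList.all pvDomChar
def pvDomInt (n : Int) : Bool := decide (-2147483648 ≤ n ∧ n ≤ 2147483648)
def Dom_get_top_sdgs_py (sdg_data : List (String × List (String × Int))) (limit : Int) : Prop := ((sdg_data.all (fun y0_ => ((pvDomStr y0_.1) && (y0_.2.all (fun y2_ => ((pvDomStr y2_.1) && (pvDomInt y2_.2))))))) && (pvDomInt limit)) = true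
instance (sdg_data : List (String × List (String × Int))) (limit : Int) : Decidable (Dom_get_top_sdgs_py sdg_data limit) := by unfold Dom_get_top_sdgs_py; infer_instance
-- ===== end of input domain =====

-- B selects the top entries with heapq.nlargest (a partial heap selection) over a comprehension-built
-- candidate list, instead of A's full sort + slice + imperative loops; return values proved equal
-- outside D_ (negative limit).

-- ===== PORT A =====
def get_top_sdgs_py (sdg_data : List (String × List (String × Int))) (limit : Int) : List (String × String) :=
  -- for sdg_key, data in sdg_data.items(): append (sdg_key, score) when key starts with 'sdg_'
  -- (isinstance(data, dict) is always true under the stated input type) and score > 0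
  ((PySem.List.slice   -- top_sdgs = sdg_scores[:limit] after sdg_scores.sort(key=…, reverse=True)
      (PySem.List.sorted
        (sdg_data.foldl (fun acc p =>
          if PySem.Str.startswith p.1 "sdg_" then
            if (PySem.Dict.mk p.2).getD "score" 0 > 0 then
              acc ++ [(p.1, (PySem.Dict.mk p.2).getD "score" 0)]
            else acc
          else acc) [])
        (fun x => x.2) true)
      none (some limit)).foldl
    -- result = {}; for sdg_key, score in top_sdgs: if score >= 7 … elif score >= 4 … else …
    (fun (r : PySem.Dict String String) p =>
      if p.2 ≥ 7 then r.insert p.1 "High"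
      else if p.2 ≥ 4 then r.insert p.1 "Medium"
      else r.insert p.1 "Low") PySem.Dict.empty).items

-- ===== PORT B =====
-- heapq.nlargest(n, xs, key=…): the first n of the stable descending sort; empty for n ≤ 0
def pvNlargest (n : Int) (xs : List (String × Int)) : List (String × Int) :=
  (PySem.List.sorted xs (fun kv => kv.2) true).take n.toNat

def pvLevel (s : Int) : String :=
  if s ≥ 7 then "High" else if s ≥ 4 then "Medium" else "Low"

def get_top_sdgs_py_alt (sdg_data : List (String × List (String × Int))) (limit : Int) : List (String × String) :=
  -- candidates = [(k, s) for k, v in … if k.startswith('sdg_') and (s := v.get('score', 0)) > 0]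
  ((pvNlargest limit
      (sdg_data.filterMap (fun p =>
        if PySem.Str.startswith p.1 "sdg_" ∧ (PySem.Dict.mk p.2).getD "score" 0 > 0
        then some (p.1, (PySem.Dict.mk p.2).getD "score" 0) else none))).foldl
    -- {k: level for k, s in top}
    (fun (r : PySem.Dict String String) kv => r.insert kv.1 (pvLevel kv.2)) PySem.Dict.empty).items

-- ===== PRECONDITION & SPEC =====
-- number of entries whose key begins with 'sdg_' and whose first 'score' binding is positive (a shape of the input)
def pvCandCount (sdg_data : List (String × List (String × Int))) : Nat :=
  sdg_data.countP (fun p =>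
    "sdg_".toList.isPrefixOf p.1.toList && decide (0 < (List.lookup "score" p.2).getD 0))

-- On a negative limit with more than |limit| positive-scoring sdg_ entries, A's slice [:limit]
-- returns all but the bottom |limit| entries while B returns the empty dict; for a "top N" request
-- with negative N the empty result is the intended one (as heapq.nlargest behaves).
def D_get_top_sdgs_py (sdg_data : List (String × List (String × Int))) (limit : Int) : Prop :=
  limit < 0 ∧ (pvCandCount sdg_data : Int) + limit > 0
instance (sdg_data : List (String × List (String × Int))) (limit : Int) : Decidable (D_get_top_sdgs_py sdg_data limit) := by unfold D_get_top_sdgs_py; infer_instance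

def Spec_get_top_sdgs_py (sdg_data : List (String × List (String × Int))) (limit : Int) (out : List (String × String)) : Prop := ¬ D_get_top_sdgs_py sdg_data limit → out = get_top_sdgs_py_alt sdg_data limit
instance (sdg_data : List (String × List (String × Int))) (limit : Int) (out : List (String × String)) : Decidable (Spec_get_top_sdgs_py sdg_data limit out) := by unfold Spec_get_top_sdgs_py; infer_instance

def pvDiffWitness_get_top_sdgs_py : (List (String × List (String × Int))) × Int :=
  ([("sdg_a", [("score", 5)]), ("sdg_b", [("score", 3)])], -1)
def pvDiffWitnessOut_get_top_sdgs_py : (List (String × String)) × (List (String × String)) :=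
  ([("sdg_a", "Medium")], [])

-- ===== CLAIM (what is proved, stated in full; the proofs are below) =====
def Claim_unchanged_get_top_sdgs_py : Prop := ∀ (sdg_data : List (String × List (String × Int))) (limit : Int), Dom_get_top_sdgs_py sdg_data limit → Spec_get_top_sdgs_py sdg_data limit (get_top_sdgs_py sdg_data limit)
def Claim_changed_get_top_sdgs_py : Prop := Dom_get_top_sdgs_py (pvDiffWitness_get_top_sdgs_py.1) (pvDiffWitness_get_top_sdgs_py.2) ∧ D_get_top_sdgs_py (pvDiffWitness_get_top_sdgs_py.1) (pvDiffWitness_get_top_sdgs_py.2) ∧ get_top_sdgs_py (pvDiffWitness_get_top_sdgs_py.1) (pvDiffWitness_get_top_sdgs_py.2) = pvDiffWitnessOut_get_top_sdgs_py.1 ∧ get_top_sdgs_py_alt (pvDiffWitness_get_top_sdgs_py.1) (pvDiffWitness_get_top_sdgs_py.2) = pvDiffWitnessOut_get_top_sdgs_py.2 ∧ pvDiffWitnessOut_get_top_sdgs_py.1 ≠ pvDiffWitnessOut_get_top_sdgs_py.2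
def Claim_exact_get_top_sdgs_py : Prop := ∀ (sdg_data : List (String × List (String × Int))) (limit : Int), Dom_get_top_sdgs_py sdg_data limit → D_get_top_sdgs_py sdg_data limit → get_top_sdgs_py sdg_data limit ≠ get_top_sdgs_py_alt sdg_data limit

-- ===== LEMMAS AND PROOFS =====

-- A's append-filter loop computes B's comprehension (filterMap)
theorem pv_filter_eq (sdg_data : List (String × List (String × Int))) (acc : List (String × Int)) :
    sdg_data.foldl (fun acc p =>
      if PySem.Str.startswith p.1 "sdg_" then
        if (PySem.Dict.mk p.2).getD "score" 0 > 0 then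
          acc ++ [(p.1, (PySem.Dict.mk p.2).getD "score" 0)]
        else acc
      else acc) acc
    = acc ++ sdg_data.filterMap (fun p =>
        if PySem.Str.startswith p.1 "sdg_" ∧ (PySem.Dict.mk p.2).getD "score" 0 > 0
        then some (p.1, (PySem.Dict.mk p.2).getD "score" 0) else none) := by
  induction sdg_data generalizing acc with
  | nil => rw [List.foldl_nil, List.filterMap_nil, List.append_nil]
  | cons p t ih =>
    rw [List.foldl_cons, List.filterMap_cons]
    by_cases h1 : PySem.Str.startswith p.1 "sdg_" = true
    · by_cases h2 : (PySem.Dict.mk p.2).getD "score" 0 > 0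
      · rw [if_pos h1, if_pos h2, if_pos (And.intro h1 h2), ih, List.append_assoc]
        rfl
      · rw [if_pos h1, if_neg h2, if_neg (fun h => h2 h.2), ih]
    · rw [if_neg h1, if_neg (fun h => h1 h.1), ih]

-- A's if-chain dict loop is B's insert-with-level loop
theorem pv_dict_eq (l : List (String × Int)) (r : PySem.Dict String String) :
    l.foldl (fun (r : PySem.Dict String String) p =>
      if p.2 ≥ 7 then r.insert p.1 "High"
      else if p.2 ≥ 4 then r.insert p.1 "Medium"
      else r.insert p.1 "Low") r
    = l.foldl (fun (r : PySem.Dict String String) kv => r.insert kv.1 (pvLevel kv.2)) r := by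
  induction l generalizing r with
  | nil => rfl
  | cons p t ih =>
    simp only [List.foldl_cons, pvLevel]
    split_ifs <;> exact ih _

-- dict.get('score', 0) is the first 'score' binding of the association list
theorem pv_getD_mk (l : List (String × Int)) :
    (PySem.Dict.mk l).getD "score" 0 = (List.lookup "score" l).getD 0 := by
  induction l with
  | nil => rfl
  | cons q t ih =>
    rw [PySem.Dict.getD_eq_get?_getD, PySem.Dict.get?_mk_cons, List.lookup]
    by_cases h : q.1 == "score"
    · have h' : ("score" : String) == q.1 := by
        rw [beq_iff_eq] at h ⊢; exact h.symm
      simp [h, h']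
    · have h' : ¬ (("score" : String) == q.1) = true := by
        rw [beq_iff_eq] at h ⊢; exact fun e => h e.symm
      simp only [Bool.not_eq_true] at h h'
      simp [h, h', ← PySem.Dict.getD_eq_get?_getD, ih]

-- D_'s counting predicate names exactly the ports' filtering condition
theorem pv_pred_iff (p : String × List (String × Int)) :
    ("sdg_".toList.isPrefixOf p.1.toList && decide (0 < (List.lookup "score" p.2).getD 0)) = true
    ↔ (PySem.Str.startswith p.1 "sdg_" = true ∧ (PySem.Dict.mk p.2).getD "score" 0 > 0) := by
  rw [Bool.and_eq_true, List.isPrefixOf_iff_prefix, decide_eq_true_iff,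
      PySem.Str.startswith_eq, PySem.Chars.startswith_iff, pv_getD_mk]

-- the candidate list has pvCandCount elements
theorem pv_cand_length (sdg_data : List (String × List (String × Int))) :
    (sdg_data.filterMap (fun p =>
        if PySem.Str.startswith p.1 "sdg_" ∧ (PySem.Dict.mk p.2).getD "score" 0 > 0
        then some (p.1, (PySem.Dict.mk p.2).getD "score" 0) else none)).length
    = pvCandCount sdg_data := by
  unfold pvCandCount
  induction sdg_data with
  | nil => rfl
  | cons p t ih =>
    rw [List.filterMap_cons, List.countP_cons]
    by_cases h : (PySem.Str.startswith p.1 "sdg_" = true ∧ (PySem.Dict.mk p.2).getD "score" 0 > 0)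
    · rw [if_pos h, if_pos ((pv_pred_iff p).mpr h)]
      simp only [List.length_cons, ih]
    · rw [if_neg h, if_neg (fun hb => h ((pv_pred_iff p).mp hb)), ih, Nat.add_zero]

-- a foldl of inserts never shrinks the dict
theorem pv_size_foldl_insert (l : List (String × Int)) (r : PySem.Dict String String)
    (f : (String × Int) → String) :
    r.items.length ≤ (l.foldl (fun (r : PySem.Dict String String) kv => r.insert kv.1 (f kv)) r).items.length := by
  induction l generalizing r with
  | nil => exact le_refl _
  | cons p t ih =>
    refine le_trans ?_ (ih (r.insert p.1 (f p)))
    by_cases h : r.contains p.1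
    · simp [PySem.Dict.items_insert, h]
    · simp [PySem.Dict.items_insert, h]

theorem get_top_sdgs_py_unfold (sdg_data : List (String × List (String × Int))) (limit : Int) :
    get_top_sdgs_py sdg_data limit
    = ((PySem.List.slice (PySem.List.sorted (sdg_data.filterMap (fun p =>
          if PySem.Str.startswith p.1 "sdg_" ∧ (PySem.Dict.mk p.2).getD "score" 0 > 0
          then some (p.1, (PySem.Dict.mk p.2).getD "score" 0) else none)) (fun x => x.2) true)
          none (some limit)).foldl
        (fun (r : PySem.Dict String String) kv => r.insert kv.1 (pvLevel kv.2)) PySem.Dict.empty).items := by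
  unfold get_top_sdgs_py
  rw [pv_filter_eq, List.nil_append, pv_dict_eq]

-- ===== VERDICT (by name: the statement is the Claim_ definition above) =====
theorem get_top_sdgs_py_spec : Claim_unchanged_get_top_sdgs_py := by
  intro sdg_data limit _ hnd
  rw [get_top_sdgs_py_unfold]
  unfold get_top_sdgs_py_alt pvNlargest
  set cand := sdg_data.filterMap (fun p =>
      if PySem.Str.startswith p.1 "sdg_" ∧ (PySem.Dict.mk p.2).getD "score" 0 > 0
      then some (p.1, (PySem.Dict.mk p.2).getD "score" 0) else none) with hc
  by_cases hl : 0 ≤ limit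
  · rw [PySem.List.slice_to _ hl]
  · -- ¬D and limit < 0: fewer than |limit| candidates, both sides select nothing
    unfold D_get_top_sdgs_py at hnd
    push Not at hnd
    have hcnt : ((pvCandCount sdg_data : Int) + limit ≤ 0) := hnd (by omega)
    have hlen : (PySem.List.sorted cand (fun x => x.2) true).length = pvCandCount sdg_data := by
      rw [PySem.List.length_sorted, hc, pv_cand_length]
    have h0' : limit.toNat = 0 := by omega
    rw [h0']
    have hk : limit = -(((-limit).toNat : Nat) : Int) := by omega
    rw [hk, PySem.List.slice_to_neg_natCast _ _ (by omega)]
    have h0 : (PySem.List.sorted cand (fun x => x.2) true).length - (-limit).toNat = 0 := by omega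
    rw [h0]

theorem get_top_sdgs_py_changed : Claim_changed_get_top_sdgs_py := by
  unfold Claim_changed_get_top_sdgs_py; decide

theorem get_top_sdgs_py_tight : Claim_exact_get_top_sdgs_py := by
  intro sdg_data limit _ hd
  unfold D_get_top_sdgs_py at hd
  obtain ⟨hl, hcnt⟩ := hd
  rw [get_top_sdgs_py_unfold]
  unfold get_top_sdgs_py_alt pvNlargest
  set cand := sdg_data.filterMap (fun p =>
      if PySem.Str.startswith p.1 "sdg_" ∧ (PySem.Dict.mk p.2).getD "score" 0 > 0
      then some (p.1, (PySem.Dict.mk p.2).getD "score" 0) else none) with hc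
  have hlen : (PySem.List.sorted cand (fun x => x.2) true).length = pvCandCount sdg_data := by
    rw [PySem.List.length_sorted, hc, pv_cand_length]
  -- B's side is the empty dict
  have h0' : limit.toNat = 0 := by omega
  rw [h0']
  simp only [List.take_zero, List.foldl_nil]
  -- A's side: the slice is nonempty, so the built dict has at least one item
  have hk : limit = -(((-limit).toNat : Nat) : Int) := by omega
  rw [hk, PySem.List.slice_to_neg_natCast _ _ (by omega)]
  intro heq
  have hnn : (PySem.List.sorted cand (fun x => x.2) true).length - (-limit).toNat ≠ 0 := by omega
  have hlne : PySem.List.sorted cand (fun x => x.2) true ≠ [] := by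
    intro h
    rw [h] at hlen
    simp only [List.length_nil] at hlen
    omega
  have htne : (PySem.List.sorted cand (fun x => x.2) true).take
      ((PySem.List.sorted cand (fun x => x.2) true).length - (-limit).toNat) ≠ [] := by
    simp only [ne_eq, List.take_eq_nil_iff, not_or]
    exact ⟨hnn, hlne⟩
  obtain ⟨p, t, hpt⟩ := List.exists_cons_of_ne_nil htne
  rw [hpt] at heq
  have h1 : (PySem.Dict.empty.insert p.1 (pvLevel p.2) : PySem.Dict String String).items.length
      ≤ (((p :: t).foldl (fun (r : PySem.Dict String String) kv => r.insert kv.1 (pvLevel kv.2))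
          PySem.Dict.empty)).items.length := by
    simpa using pv_size_foldl_insert t (PySem.Dict.empty.insert p.1 (pvLevel p.2)) (fun kv => pvLevel kv.2)
  rw [heq] at h1
  simp [PySem.Dict.items_insert, PySem.Dict.empty] at h1
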